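-- pv_equiv track=rewrite | github.com/qarigby/Improved-Minesweeper_Solver | prob_helpers.py | generate_valid_configs
-- ===== SOURCE A (Python) =====
-- def generate_valid_configs(constraints, frontiers):
--     frontier_list = list(frontiers)
--     tile_indices = {tile: i for i, tile in enumerate(frontier_list)}
--     num_tiles = len(frontier_list)
--     valid_configs = []
--
--     for bits in range(1 << num_tiles):
--         config = [(bits >> i) & 1 for i in range(num_tiles)]
--
--         valid = True
--         for tiles, mine_count in constraints:
--             count = sum(config[tile_indices[t]] for t in tiles if t in tile_indices)
--             if count != mine_count:
--                 valid = False
--                 break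
--
--         if valid:
--             valid_configs.append(config)
--
--     return valid_configs, frontier_list
-- ===== SOURCE B (Python) =====
-- def generate_valid_configs(constraints, frontiers):
--     frontier_list = list(frontiers)
--     idx = {tile: i for i, tile in enumerate(frontier_list)}
--     n = len(frontier_list)
--     cs = [([idx[t] for t in tiles if t in idx], mine_count)
--           for tiles, mine_count in constraints]
--
--     def dfs(i, partial, counts):
--         # partial holds the bits for indices i..n-1; counts[k] is the sum the
--         # k-th constraint already collects from those decided indices.
--         if any(all(j >= i for j in ixs) and c != m
--                for (ixs, m), c in zip(cs, counts)):
--             return []          # a fully-decided constraint is violated: prune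
--         if i == 0:
--             return [partial]
--         counts1 = [c + ixs.count(i - 1) for (ixs, _), c in zip(cs, counts)]
--         return dfs(i - 1, [0] + partial, counts) + dfs(i - 1, [1] + partial, counts1)
--
--     return dfs(n, [], [0] * len(cs)), frontier_list
-- ===== Notes on version B (the rewrite author's own statement) =====
-- stated objective: faster
-- what changed: Replaced the brute-force enumeration of all 2^n bit patterns (each checked against every constraint) by a constraint-propagating backtracking DFS that assigns tiles from the highest index down, maintains per-constraint running counts, and prunes a branch as soon as some fully-decided constraint's count misses its target.
import Mathlib
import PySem

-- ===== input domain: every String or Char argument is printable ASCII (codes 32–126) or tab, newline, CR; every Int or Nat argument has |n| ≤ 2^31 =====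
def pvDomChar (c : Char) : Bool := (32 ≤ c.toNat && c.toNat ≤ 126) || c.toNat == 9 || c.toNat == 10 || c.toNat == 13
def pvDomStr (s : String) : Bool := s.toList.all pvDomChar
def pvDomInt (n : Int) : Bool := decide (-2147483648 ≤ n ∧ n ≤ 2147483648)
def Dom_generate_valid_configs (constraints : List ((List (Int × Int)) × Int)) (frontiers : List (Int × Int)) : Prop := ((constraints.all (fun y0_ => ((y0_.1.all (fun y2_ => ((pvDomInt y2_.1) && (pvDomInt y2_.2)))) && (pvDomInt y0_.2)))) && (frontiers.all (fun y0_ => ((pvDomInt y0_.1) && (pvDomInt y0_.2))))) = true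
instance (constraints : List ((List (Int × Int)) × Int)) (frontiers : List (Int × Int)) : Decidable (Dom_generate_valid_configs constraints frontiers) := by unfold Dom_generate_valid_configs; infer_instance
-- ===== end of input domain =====

-- B replaces A's brute-force scan of all 2^n bit patterns by a backtracking DFS with
-- per-constraint running counts and pruning (objective: faster; same return value).

-- shared preprocessing (the identical Python line `{tile: i for i, tile in enumerate(frontier_list)}`)
def pvTileIndices (fs : List (Int × Int)) : PySem.Dict (Int × Int) Int :=
  (PySem.List.enumerate fs 0).foldl (fun d p => d.insert p.2 p.1) PySem.Dict.empty

-- ===== PORT A =====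
-- sum(config[tile_indices[t]] for t in tiles if t in tile_indices); the dict value is
-- always an in-range index, so the `none` branch of get? (Python's guarded `t in tile_indices`)
-- just skips the term and pyGetD's default is never consulted.
def pvCountA (d : PySem.Dict (Int × Int) Int) (config : List Int) (tiles : List (Int × Int)) : Int :=
  tiles.foldl (fun acc t =>
    match d.get? t with
    | some i => acc + PySem.List.pyGetD config i 0
    | none => acc) 0

-- `for tiles, mine_count in constraints: … if count != mine_count: valid = False; break`
def pvValidA (d : PySem.Dict (Int × Int) Int) (config : List Int) :
    List ((List (Int × Int)) × Int) → Bool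
  | [] => true
  | c :: rest => if pvCountA d config c.1 ≠ c.2 then false else pvValidA d config rest

def generate_valid_configs (constraints : List ((List (Int × Int)) × Int)) (frontiers : List (Int × Int)) : List (List Int) × (List (Int × Int)) :=
  let frontier_list := frontiers
  let d := pvTileIndices frontier_list
  let n := frontier_list.length
  let valid_configs := (PySem.List.pyRange 0 ((1:Int) <<< n) 1).foldl
    (fun acc bits =>
      let config := (PySem.List.pyRange 0 (n:Int) 1).map
        (fun i => PySem.Int.band (bits >>> i.toNat) 1)
      if pvValidA d config constraints then acc ++ [config] else acc) []
  (valid_configs, frontier_list)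

-- ===== PORT B =====
-- dfs(i, partial, counts) from Source B: partial covers indices i..n-1, counts are the
-- per-constraint sums over those decided indices; prune, leaf, or branch on 0/1.
def pvDfs (cs : List (List Int × Int)) : Nat → List Int → List Int → List (List Int)
  | i, part, counts =>
    if (cs.zip counts).any (fun p => p.1.1.all (fun j => (i:Int) ≤ j) && p.2 != p.1.2) then []
    else
      match i with
      | 0 => [part]
      | i' + 1 =>
        pvDfs cs i' (0 :: part) counts ++
        pvDfs cs i' (1 :: part)
          ((cs.zip counts).map (fun p => p.2 + (p.1.1.count ((i' : Nat) : Int) : Int)))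

def generate_valid_configs_alt (constraints : List ((List (Int × Int)) × Int)) (frontiers : List (Int × Int)) : List (List Int) × (List (Int × Int)) :=
  let frontier_list := frontiers
  let d := pvTileIndices frontier_list
  let n := frontier_list.length
  let cs := constraints.map (fun c => (c.1.filterMap (fun t => d.get? t), c.2))
  (pvDfs cs n [] (List.replicate cs.length 0), frontier_list)

-- ===== PRECONDITION & SPEC =====
def Spec_generate_valid_configs (constraints : List ((List (Int × Int)) × Int)) (frontiers : List (Int × Int)) (out : List (List Int) × (List (Int × Int))) : Prop := out = generate_valid_configs_alt constraints frontiers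
instance (constraints : List ((List (Int × Int)) × Int)) (frontiers : List (Int × Int)) (out : List (List Int) × (List (Int × Int))) : Decidable (Spec_generate_valid_configs constraints frontiers out) := by unfold Spec_generate_valid_configs; infer_instance

-- ===== CLAIM (what is proved, stated in full; the proofs are below) =====
def Claim_equal_generate_valid_configs : Prop := ∀ (constraints : List ((List (Int × Int)) × Int)) (frontiers : List (Int × Int)), Dom_generate_valid_configs constraints frontiers → Spec_generate_valid_configs constraints frontiers (generate_valid_configs constraints frontiers)

-- ===== LEMMAS AND PROOFS =====

-- proof-side vocabulary: constraints as Nat index lists, sums, tail sums over the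
-- already-decided suffix, and A's enumeration order as a recursive list
def pvSumN (config : List Int) (ks : List Nat) : Int :=
  (ks.map (fun k => config.getD k 0)).sum

def pvTail (i : Nat) (part : List Int) (ks : List Nat) : Int :=
  ((ks.filter (fun k => decide (i ≤ k))).map (fun k => part.getD (k - i) 0)).sum

def pvEnum : Nat → List (List Int)
  | 0 => [[]]
  | i + 1 => (pvEnum i).map (· ++ [0]) ++ (pvEnum i).map (· ++ [1])

def pvICs (cs : List (List Nat × Int)) : List (List Int × Int) :=
  cs.map (fun c => (c.1.map (Nat.cast : Nat → Int), c.2))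

def pvOk (cs : List (List Nat × Int)) (cfg : List Int) : Bool :=
  cs.all (fun c => pvSumN cfg c.1 == c.2)

def pvCfgN (n m : Nat) : List Int :=
  (List.range n).map (fun k => ((m / 2 ^ k % 2 : Nat) : Int))

lemma pvSumN_cons (cfg : List Int) (k : Nat) (ks : List Nat) :
    pvSumN cfg (k :: ks) = cfg.getD k 0 + pvSumN cfg ks := by simp [pvSumN]

lemma pvTail_step (i : Nat) (part : List Int) (k : Nat) (ks : List Nat) :
    pvTail i part (k :: ks) =
      (if i ≤ k then part.getD (k - i) 0 else 0) + pvTail i part ks := by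
  by_cases h : i ≤ k <;> simp [pvTail, h]

lemma pvTail_nil (i : Nat) (ks : List Nat) : pvTail i [] ks = 0 := by
  induction ks with
  | nil => simp [pvTail]
  | cons k ks ih => rw [pvTail_step, ih]; simp

lemma pvTail_zero (part : List Int) (ks : List Nat) : pvTail 0 part ks = pvSumN part ks := by
  induction ks with
  | nil => simp [pvTail, pvSumN]
  | cons k ks ih => rw [pvTail_step, pvSumN_cons, ih]; simp

lemma pvSum_split (pre part : List Int) (ks : List Nat) :
    pvSumN (pre ++ part) ks =
      ((ks.filter (fun k => decide (k < pre.length))).map (fun k => pre.getD k 0)).sum +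
        pvTail pre.length part ks := by
  induction ks with
  | nil => simp [pvSumN, pvTail]
  | cons k ks ih =>
    rw [pvSumN_cons, pvTail_step, ih, List.filter_cons]
    by_cases h : k < pre.length
    · rw [List.getD_append pre part 0 k h, if_neg (by omega : ¬ pre.length ≤ k)]
      simp only [h, decide_true, if_true, List.map_cons, List.sum_cons]
      ring
    · rw [List.getD_append_right pre part 0 k (by omega),
        if_pos (by omega : pre.length ≤ k)]
      simp only [h, decide_false, Bool.false_eq_true, if_false]
      ring

lemma pvTail_cons (i : Nat) (v : Int) (part : List Int) (ks : List Nat) :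
    pvTail i (v :: part) ks = pvTail (i + 1) part ks + v * (ks.count i : Int) := by
  induction ks with
  | nil => simp [pvTail]
  | cons k ks ih =>
    rw [pvTail_step, pvTail_step, ih, List.count_cons]
    by_cases hk : k = i
    · subst hk
      rw [if_pos (le_refl k), if_neg (by omega), Nat.sub_self, List.getD_cons_zero]
      simp only [BEq.rfl, if_true]
      push_cast; ring
    · by_cases h2 : i ≤ k
      · rw [if_pos h2, if_pos (by omega), show k - i = (k - (i+1)) + 1 by omega,
          List.getD_cons_succ]
        simp only [beq_iff_eq, if_neg hk]
        ring
      · rw [if_neg h2, if_neg (by omega)]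
        simp only [beq_iff_eq, if_neg hk]
        ring

lemma pvEnum_mem_length {i : Nat} {pre : List Int} (h : pre ∈ pvEnum i) : pre.length = i := by
  induction i generalizing pre with
  | zero => simp [pvEnum] at h; simp [h]
  | succ i ih =>
    simp only [pvEnum, List.mem_append, List.mem_map] at h
    rcases h with ⟨q, hq, rfl⟩ | ⟨q, hq, rfl⟩ <;> simp [ih hq]

lemma pvCfgN_low (n m : Nat) (hm : m < 2 ^ n) : pvCfgN (n + 1) m = pvCfgN n m ++ [0] := by
  simp only [pvCfgN, List.range_succ, List.map_append, List.map_cons, List.map_nil]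
  congr 1
  simp [Nat.div_eq_of_lt hm]

lemma pvCfgN_high (n m : Nat) (hm : m < 2 ^ n) :
    pvCfgN (n + 1) (2 ^ n + m) = pvCfgN n m ++ [1] := by
  simp only [pvCfgN, List.range_succ, List.map_append, List.map_cons, List.map_nil]
  congr 1
  · apply List.map_congr_left
    intro k hk
    rw [List.mem_range] at hk
    have h1 : 2 ^ n = 2 ^ k * 2 ^ (n - k) := by
      rw [← pow_add]; congr 1; omega
    rw [h1, Nat.add_comm, Nat.add_mul_div_left _ _ (by positivity)]
    have h2 : 2 ^ (n - k) = 2 * 2 ^ (n - k - 1) := by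
      rw [← pow_succ']; congr 1; omega
    rw [h2, Nat.add_mul_mod_self_left]
  · have : (2 ^ n + m) / 2 ^ n = 1 := by
      rw [Nat.add_div_of_dvd_right ⟨1, by ring⟩, Nat.div_self (by positivity),
        Nat.div_eq_of_lt hm]
    simp [this]

lemma pvCfgN_eq (n : Nat) : (List.range (2 ^ n)).map (pvCfgN n) = pvEnum n := by
  induction n with
  | zero => simp [pvCfgN, pvEnum]
  | succ n ih =>
    have hsplit : List.range (2 ^ (n + 1)) =
        List.range (2 ^ n) ++ (List.range (2 ^ n)).map (2 ^ n + ·) := by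
      rw [← List.range_add]; congr 1; ring
    rw [hsplit, List.map_append, List.map_map]
    simp only [pvEnum]
    congr 1
    · rw [← ih, List.map_map]
      apply List.map_congr_left
      intro m hm
      exact pvCfgN_low n m (List.mem_range.mp hm)
    · rw [← ih, List.map_map]
      apply List.map_congr_left
      intro m hm
      exact pvCfgN_high n m (List.mem_range.mp hm)

lemma pvMapA_eq (n : Nat) :
    (PySem.List.pyRange 0 ((1:Int) <<< n) 1).map
        (fun bits => (PySem.List.pyRange 0 (n:Int) 1).map
          (fun i => PySem.Int.band (bits >>> i.toNat) 1)) = pvEnum n := by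
  have h1 : (1:Int) <<< n = ((2 ^ n : Nat) : Int) := by simp [Int.shiftLeft_eq]
  rw [h1, PySem.List.pyRange_zero_nat (2 ^ n), List.map_map, ← pvCfgN_eq]
  apply List.map_congr_left
  intro m _
  show (PySem.List.pyRange 0 (n:Int) 1).map _ = _
  rw [PySem.List.pyRange_zero_nat, List.map_map]
  apply List.map_congr_left
  intro k _
  show PySem.Int.band (((m:Int)) >>> ((k:Int)).toNat) 1 = _
  have h2 : ((k:Int)).toNat = k := by simp
  have h3 : ((m:Int) >>> k) = ((m >>> k : Nat) : Int) := by simp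
  rw [h2, h3, show (1:Int) = ((1:Nat):Int) by norm_num, PySem.Int.band_natCast,
    Nat.and_one_is_mod, Nat.shiftRight_eq_div_pow]

lemma pvDict_fold_bound (fs : List (Int × Int)) :
    ∀ (s : Int) (d : PySem.Dict (Int × Int) Int) (t : Int × Int) (i : Int),
      ((PySem.List.enumerate fs s).foldl (fun d p => d.insert p.2 p.1) d).get? t = some i →
      d.get? t = some i ∨ (s ≤ i ∧ i < s + fs.length) := by
  induction fs with
  | nil => intro s d t i h; simp [PySem.List.enumerate_nil] at h; exact Or.inl h
  | cons f fs ih =>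
    intro s d t i h
    rw [PySem.List.enumerate_cons, List.foldl_cons] at h
    rcases ih (s + 1) (d.insert f s) t i h with h' | h'
    · rw [PySem.Dict.get?_insert] at h'
      by_cases ht : t = f
      · right; rw [if_pos ht] at h'
        have hi : i = s := by injection h' with h''; omega
        subst hi
        simp only [List.length_cons]
        push_cast; omega
      · left; rwa [if_neg ht] at h'
    · right; simp only [List.length_cons]; push_cast; omega

lemma pvTileIndices_bound (fs : List (Int × Int)) (t : Int × Int) (i : Int)
    (h : (pvTileIndices fs).get? t = some i) : 0 ≤ i ∧ i < fs.length := by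
  rcases pvDict_fold_bound fs 0 PySem.Dict.empty t i h with h' | h'
  · rw [PySem.Dict.get?_empty] at h'; cases h'
  · omega

lemma pvCountA_gen (d : PySem.Dict (Int × Int) Int) (config : List Int)
    (hd : ∀ t j, d.get? t = some j → 0 ≤ j) :
    ∀ (tiles : List (Int × Int)) (a : Int),
    tiles.foldl (fun acc t =>
      match d.get? t with
      | some i => acc + PySem.List.pyGetD config i 0
      | none => acc) a =
      a + pvSumN config ((tiles.filterMap (fun t => d.get? t)).map Int.toNat) := by
  intro tiles
  induction tiles with
  | nil => intro a; simp [pvSumN]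
  | cons t tiles ih =>
    intro a
    rw [List.foldl_cons, List.filterMap_cons]
    cases hg : d.get? t with
    | none => simpa using ih a
    | some j =>
      have hj : 0 ≤ j := hd t j hg
      simp only [List.map_cons]
      rw [ih]
      have h4 : j = ((j.toNat : Nat) : Int) := by omega
      have h5 : PySem.List.pyGetD config j 0 = config.getD j.toNat 0 := by
        rw [h4, PySem.List.pyGetD_natCast]; simp; rw [show max j 0 = j from by omega]
      rw [h5]
      simp only [pvSumN, List.map_cons, List.sum_cons]
      ring

lemma pvValidA_eq (d : PySem.Dict (Int × Int) Int) (config : List Int)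
    (hd : ∀ t j, d.get? t = some j → 0 ≤ j) (cons : List ((List (Int × Int)) × Int)) :
    pvValidA d config cons =
      pvOk (cons.map (fun c => ((c.1.filterMap (fun t => d.get? t)).map Int.toNat, c.2))) config := by
  induction cons with
  | nil => simp [pvValidA, pvOk]
  | cons c rest ih =>
    rw [pvValidA]
    simp only [List.map_cons, pvOk, List.all_cons]
    rw [← pvOk, ← ih]
    have hc : pvCountA d config c.1 =
        pvSumN config ((c.1.filterMap (fun t => d.get? t)).map Int.toNat) := by
      simpa using pvCountA_gen d config hd c.1 0
    by_cases h : pvCountA d config c.1 = c.2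
    · rw [if_neg (by omega), ← hc]
      simp [h]
    · rw [if_pos (by omega), ← hc]
      simp [h]

lemma pvPrune_eq (cs : List (List Nat × Int)) (i : Nat) (g : List Nat × Int → Int) :
    ((pvICs cs).zip (cs.map g)).any
        (fun p => p.1.1.all (fun j => (i:Int) ≤ j) && p.2 != p.1.2)
      = cs.any (fun c => c.1.all (fun k => decide (i ≤ k)) && g c != c.2) := by
  unfold pvICs
  rw [List.zip_map', List.any_map]
  congr 1
  funext c
  simp [Function.comp_def]

lemma pvUpd_eq (cs : List (List Nat × Int)) (i : Nat) (g : List Nat × Int → Int) :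
    ((pvICs cs).zip (cs.map g)).map (fun p => p.2 + (p.1.1.count ((i : Nat) : Int) : Int))
      = cs.map (fun c => g c + (c.1.count i : Int)) := by
  rw [pvICs, List.zip_map', List.map_map]
  apply List.map_congr_left
  intro c _
  show g c + ((c.1.map (Nat.cast : Nat → Int)).count ((i : Nat) : Int) : Int)
      = g c + (c.1.count i : Int)
  rw [List.count_map_of_injective c.1 (Nat.cast : Nat → Int)
    (fun a b h => by exact_mod_cast h) i]

lemma pvNoPrune0 (cs : List (List Nat × Int)) (part : List Int) :
    cs.any (fun c => c.1.all (fun k => decide (0 ≤ k)) && pvTail 0 part c.1 != c.2)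
      = !(pvOk cs part) := by
  unfold pvOk
  rw [List.not_all_eq_any_not]
  congr 1
  funext c
  cases hb : pvSumN part c.1 == c.2 <;>
    simp [pvTail_zero, hb] <;> simpa [beq_iff_eq] using hb

lemma pvDfs_eq (cs : List (List Nat × Int)) :
    ∀ (i : Nat) (part : List Int),
      pvDfs (pvICs cs) i part (cs.map (fun c => pvTail i part c.1)) =
        ((pvEnum i).map (· ++ part)).filter (pvOk cs) := by
  intro i
  induction i with
  | zero =>
    intro part
    rw [pvDfs, pvPrune_eq, pvNoPrune0]
    by_cases hok : pvOk cs part = true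
    · rw [hok]; simp [pvEnum, hok]
    · rw [Bool.not_eq_true] at hok
      rw [hok]; simp [pvEnum, hok]
  | succ i ih =>
    intro part
    rw [pvDfs, pvPrune_eq]
    by_cases hpr : cs.any (fun c => c.1.all (fun k => decide (i + 1 ≤ k)) && pvTail (i+1) part c.1 != c.2) = true
    · rw [if_pos hpr]
      symm
      rw [List.filter_eq_nil_iff]
      intro cfg hcfg
      rcases List.mem_map.mp hcfg with ⟨pre, hpre, rfl⟩
      have hlen : pre.length = i + 1 := pvEnum_mem_length hpre
      rcases List.any_eq_true.mp hpr with ⟨c, hc, hcond⟩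
      rw [Bool.and_eq_true] at hcond
      obtain ⟨hall, hne⟩ := hcond
      simp only [pvOk, List.all_eq_true]
      intro habs
      have h1 := habs c hc
      have h2 : pvSumN (pre ++ part) c.1 = pvTail (i+1) part c.1 := by
        rw [pvSum_split, hlen]
        have : c.1.filter (fun k => decide (k < i + 1)) = [] := by
          rw [List.filter_eq_nil_iff]
          intro k hk
          have := List.all_eq_true.mp hall k hk
          simp at this ⊢; omega
        rw [this]; simp
      rw [beq_iff_eq, h2] at h1
      exact bne_iff_ne.mp hne h1
    · rw [if_neg hpr]
      have h0 : (cs.map (fun c => pvTail (i+1) part c.1))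
          = cs.map (fun c => pvTail i (0 :: part) c.1) := by
        apply List.map_congr_left; intro c _
        rw [pvTail_cons]; ring
      have h1 : ((pvICs cs).zip (cs.map (fun c => pvTail (i+1) part c.1))).map
            (fun p => p.2 + (p.1.1.count ((i : Nat) : Int) : Int))
          = cs.map (fun c => pvTail i (1 :: part) c.1) := by
        rw [pvUpd_eq]
        apply List.map_congr_left; intro c _
        rw [pvTail_cons]; ring
      rw [h1, h0]
      rw [ih, ih]
      show _ = ((pvEnum (i+1)).map (· ++ part)).filter (pvOk cs)
      rw [pvEnum]
      rw [List.map_append, List.filter_append, List.map_map, List.map_map]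
      congr 2
      · symm; apply List.map_congr_left; intro q _
        show (q ++ [0]) ++ part = q ++ (0 :: part); simp
      · symm; apply List.map_congr_left; intro q _
        show (q ++ [1]) ++ part = q ++ (1 :: part); simp

-- ===== VERDICT (by name: the statement is the Claim_ definition above) =====
lemma pv_main (constraints : List ((List (Int × Int)) × Int)) (frontiers : List (Int × Int)) :
    generate_valid_configs constraints frontiers
      = generate_valid_configs_alt constraints frontiers := by
  unfold generate_valid_configs generate_valid_configs_alt
  have hd : ∀ t j, (pvTileIndices frontiers).get? t = some j → 0 ≤ j :=
    fun t j h => (pvTileIndices_bound frontiers t j h).1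
  -- the Nat-index form of the preprocessed constraints
  set ncs : List (List Nat × Int) := constraints.map
    (fun c => ((c.1.filterMap (fun t => (pvTileIndices frontiers).get? t)).map Int.toNat, c.2))
    with hncs
  have hics : constraints.map
      (fun c => (c.1.filterMap (fun t => (pvTileIndices frontiers).get? t), c.2))
      = pvICs ncs := by
    rw [hncs, pvICs, List.map_map]
    apply List.map_congr_left
    intro c _
    show (c.1.filterMap (fun t => (pvTileIndices frontiers).get? t), c.2)
        = (((c.1.filterMap (fun t => (pvTileIndices frontiers).get? t)).map Int.toNat).map
            (Nat.cast : Nat → Int), c.2)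
    rw [List.map_map]
    congr 1
    symm
    calc (c.1.filterMap (fun t => (pvTileIndices frontiers).get? t)).map
            ((Nat.cast : Nat → Int) ∘ Int.toNat)
        = (c.1.filterMap (fun t => (pvTileIndices frontiers).get? t)).map id := by
          apply List.map_congr_left
          intro j hj
          rcases List.mem_filterMap.mp hj with ⟨t, _, hg⟩
          have := hd t j hg
          simp only [Function.comp_def, id_eq]; omega
      _ = _ := List.map_id _
  simp only []
  congr 1
  -- A side: fold = filter of the full enumeration
  rw [PySem.List.foldl_append_if
    (fun bits => pvValidA (pvTileIndices frontiers)
      ((PySem.List.pyRange 0 ((frontiers.length : Nat) : Int) 1).map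
        (fun i => PySem.Int.band (bits >>> i.toNat) 1)) constraints)
    (fun bits => (PySem.List.pyRange 0 ((frontiers.length : Nat) : Int) 1).map
        (fun i => PySem.Int.band (bits >>> i.toNat) 1))]
  rw [List.nil_append]
  have key : ((PySem.List.pyRange 0 ((1:Int) <<< frontiers.length) 1).filter
        (fun bits => pvValidA (pvTileIndices frontiers)
          ((PySem.List.pyRange 0 ((frontiers.length : Nat) : Int) 1).map
            (fun i => PySem.Int.band (bits >>> i.toNat) 1)) constraints)).map
      (fun bits => (PySem.List.pyRange 0 ((frontiers.length : Nat) : Int) 1).map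
        (fun i => PySem.Int.band (bits >>> i.toNat) 1))
      = ((PySem.List.pyRange 0 ((1:Int) <<< frontiers.length) 1).map
          (fun bits => (PySem.List.pyRange 0 ((frontiers.length : Nat) : Int) 1).map
            (fun i => PySem.Int.band (bits >>> i.toNat) 1))).filter
        (fun cfg => pvValidA (pvTileIndices frontiers) cfg constraints) :=
    (List.filter_map
      (f := fun bits => (PySem.List.pyRange 0 ((frontiers.length : Nat) : Int) 1).map
        (fun i => PySem.Int.band (bits >>> i.toNat) 1))
      (p := fun cfg => pvValidA (pvTileIndices frontiers) cfg constraints)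
      (l := PySem.List.pyRange 0 ((1:Int) <<< frontiers.length) 1)).symm
  rw [key, pvMapA_eq]
  -- B side
  rw [hics]
  have hlen : (pvICs ncs).length = ncs.length := by simp [pvICs]
  rw [hlen]
  have hzero : List.replicate ncs.length (0:Int) = ncs.map (fun c => pvTail frontiers.length [] c.1) := by
    rw [← List.map_const']
    apply List.map_congr_left
    intro c _
    rw [pvTail_nil]
  rw [hzero, pvDfs_eq]
  have happ : (pvEnum frontiers.length).map (· ++ ([] : List Int)) = pvEnum frontiers.length := by
    simp
  rw [happ]
  apply List.filter_congr
  intro cfg _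
  rw [pvValidA_eq (pvTileIndices frontiers) cfg hd constraints]

-- ===== VERDICT (by name: the statement is the Claim_ definition above) =====
theorem generate_valid_configs_spec : Claim_equal_generate_valid_configs := by
  unfold Claim_equal_generate_valid_configs
  intro constraints frontiers _
  unfold Spec_generate_valid_configs
  exact pv_main constraints frontiers
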